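-- pv_equiv track=rewrite | github.com/SatoMichi/Mahjong_in_Python | JudgeRon.py | yibeikou
-- ===== SOURCE A (Python) =====
-- def yibeikou(hand):
--     ron = False
--     hand_num = pai2onlyno(hand)
--     kou_num = 0
--     for h in hand_num:
--         if(hand_num.count(h)==2):
--             kou_num = kou_num + 1
--     if(kou_num==2):
--         ron = True
--     return ron
--
-- def pai2onlyno(hand):
--     honlyno = []
--     for h in hand:
--         if(len(h)==4):
--             new_h = [h[0][0],h[1][0],h[2][0],h[3][0]]
--         elif(len(h)==3):
--             new_h = [h[0][0],h[1][0],h[2][0]]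
--         elif(len(h)==2):
--             new_h = [h[0][0],h[1][0]]
--         else:
--             new_h = [h[0][0]]
--         honlyno.append(new_h)
--     return honlyno
-- ===== SOURCE B (Python) =====
-- def yibeikou(hand):
--     keys = [[s[0] for s in (h if 2 <= len(h) <= 4 else h[:1])] for h in hand]
--     pairs = 0
--     while keys:
--         k = keys[0]
--         rest = [x for x in keys[1:] if x != k]
--         if len(keys) - len(rest) == 2:
--             pairs += 1
--         keys = rest
--     return pairs == 1
-- ===== Notes on version B (the rewrite author's own statement) =====
-- stated objective: alternative
-- what changed: B extracts equivalence classes by repeated partition: take the head key, filter it out of the remaining key list, read the class multiplicity off the length drop, and count classes of size exactly 2 (True iff exactly one) - no per-occurrence count scan and no histogram.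
import Mathlib
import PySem

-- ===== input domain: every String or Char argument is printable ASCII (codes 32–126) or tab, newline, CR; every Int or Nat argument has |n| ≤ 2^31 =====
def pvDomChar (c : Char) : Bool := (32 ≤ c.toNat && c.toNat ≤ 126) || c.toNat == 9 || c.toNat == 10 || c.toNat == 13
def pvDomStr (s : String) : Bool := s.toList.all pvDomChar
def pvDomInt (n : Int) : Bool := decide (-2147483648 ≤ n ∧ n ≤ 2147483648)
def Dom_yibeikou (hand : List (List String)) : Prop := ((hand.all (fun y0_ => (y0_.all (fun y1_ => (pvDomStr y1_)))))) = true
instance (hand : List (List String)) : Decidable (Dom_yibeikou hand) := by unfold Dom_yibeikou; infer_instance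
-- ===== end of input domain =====

-- B replaces A's per-occurrence `hand_num.count(h)` scan by repeated extraction of
-- equivalence classes (partition the remaining key list on its head key; the class
-- multiplicity is the length drop), counting classes of size exactly 2 (alternative algorithm).

-- ===== PORT A =====
-- s[0] as a one-character string; the "" default is hit exactly where Python raises IndexError (excluded by Pre_)
def pvFirst (s : String) : String :=
  match s.toList with
  | [] => ""
  | c :: _ => String.ofList [c]

-- h[i][0]; out-of-range default "" is never hit under the guarding length tests / Pre_
def pvFC (h : List String) (i : Nat) : String := pvFirst (h.getD i "")

-- A's new_h branch body, verbatim
def pvNewh (h : List String) : List String :=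
  if h.length == 4 then [pvFC h 0, pvFC h 1, pvFC h 2, pvFC h 3]
  else if h.length == 3 then [pvFC h 0, pvFC h 1, pvFC h 2]
  else if h.length == 2 then [pvFC h 0, pvFC h 1]
  else [pvFC h 0]

def pai2onlyno (hand : List (List String)) : List (List String) :=
  hand.foldl (fun honlyno h => honlyno ++ [pvNewh h]) []

def yibeikou (hand : List (List String)) : Bool :=
  let hand_num := pai2onlyno hand
  let kou_num : Int := hand_num.foldl (fun kou_num h => if hand_num.count h == 2 then kou_num + 1 else kou_num) 0
  if kou_num == 2 then true else false

-- ===== PORT B =====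
-- B's meld key: first characters of the strings of the meld (whole meld for len 2..4, else just h[:1])
def pvKey (h : List String) : List String :=
  (if 2 ≤ h.length ∧ h.length ≤ 4 then h else h.take 1).map pvFirst

-- B's while loop: pop the head key's whole equivalence class; its multiplicity is the length drop
def pvPairs : List (List String) → Int
  | [] => 0
  | k :: t =>
      (if (t.length + 1) - (t.filter (fun x => x ≠ k)).length == 2 then 1 else 0)
        + pvPairs (t.filter (fun x => x ≠ k))
termination_by l => l.length
decreasing_by
  simp only [List.length_unattach, List.length_cons]
  exact Nat.lt_succ_of_le (le_trans (List.length_filter_le _ _) (le_of_eq List.length_attach))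

def yibeikou_alt (hand : List (List String)) : Bool :=
  let keys := hand.map pvKey
  pvPairs keys == 1

-- ===== PRECONDITION & SPEC =====
-- Pre_ excludes exactly the inputs where Python A raises IndexError: an empty meld, or an
-- empty string at a position h[i][0] that A's branch actually reads.
def Pre_yibeikou (hand : List (List String)) : Prop :=
  ∀ h ∈ hand, h ≠ [] ∧
    ((2 ≤ h.length ∧ h.length ≤ 4) → ∀ s ∈ h, s ≠ "") ∧
    (¬(2 ≤ h.length ∧ h.length ≤ 4) → h.headD "" ≠ "")
instance (hand : List (List String)) : Decidable (Pre_yibeikou hand) := by unfold Pre_yibeikou; infer_instance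

def pvWitness_yibeikou : List (List String) := [["1m", "1m", "1m"], ["2m", "3p"], ["2m", "3p"]]

def Spec_yibeikou (hand : List (List String)) (out : Bool) : Prop := out = yibeikou_alt hand
instance (hand : List (List String)) (out : Bool) : Decidable (Spec_yibeikou hand out) := by unfold Spec_yibeikou; infer_instance

-- ===== CLAIM (what is proved, stated in full; the proofs are below) =====
def Claim_equal_yibeikou : Prop := ∀ (hand : List (List String)), Dom_yibeikou hand → Pre_yibeikou hand → Spec_yibeikou hand (yibeikou hand)

-- ===== LEMMAS AND PROOFS =====

-- on a nonempty meld A's branch body and B's key coincide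
theorem newh_eq_key (h : List String) (hne : h ≠ []) : pvNewh h = pvKey h := by
  match h with
  | [] => exact absurd rfl hne
  | [a] => simp [pvNewh, pvKey, pvFC]
  | [a, b] => simp [pvNewh, pvKey, pvFC]
  | [a, b, c] => simp [pvNewh, pvKey, pvFC]
  | [a, b, c, d] => simp [pvNewh, pvKey, pvFC]
  | a :: b :: c :: d :: e :: t =>
    simp [pvNewh, pvKey, pvFC]
    rw [if_neg (by omega)]
    simp

-- removing the head's class does not change the count of other elements
theorem count_filter_ne (k x : List String) (t : List (List String)) (hx : x ≠ k) :
    (t.filter (fun y => y ≠ k)).count x = t.count x := by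
  have hkx : (k == x) = false := beq_eq_false_iff_ne.mpr (Ne.symm hx)
  induction t with
  | nil => simp
  | cons a s ih =>
    by_cases h : a = k
    · subst h
      rw [List.filter_cons_of_neg (by simp), ih, List.count_cons, if_neg (by simp [hkx])]
      simp
    · rw [List.filter_cons_of_pos (by simpa using h), List.count_cons, List.count_cons, ih]

-- countP splits along the partition (· = k) / (· ≠ k)
theorem countP_partition (k : List String) (l : List (List String)) (q : List String → Bool) :
    l.countP q =
      (l.filter (fun x => x == k)).countP q + (l.filter (fun x => x ≠ k)).countP q := by
  induction l with
  | nil => rfl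
  | cons a t ih =>
    by_cases h : a = k
    · rw [List.filter_cons_of_pos (by simp [h]), List.filter_cons_of_neg (by simp [h]),
        List.countP_cons, List.countP_cons, ih]
      omega
    · rw [List.filter_cons_of_neg (by simp [h]), List.filter_cons_of_pos (by simpa using h),
        List.countP_cons, List.countP_cons, ih]
      omega

-- the (· = k) part of the partition contributes count-many hits, all at the key k
theorem countP_filter_eq (k : List String) (l : List (List String)) (q : List String → Bool) :
    (l.filter (fun x => x == k)).countP q = if q k then l.count k else 0 := by
  induction l with
  | nil => simp
  | cons a t ih =>
    by_cases h : a = k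
    · subst h
      rw [List.filter_cons_of_pos (by simp), List.countP_cons, ih, List.count_cons_self]
      split_ifs <;> simp_all
    · rw [List.filter_cons_of_neg (by simp [h]), ih, List.count_cons]
      have hak : (a == k) = false := beq_eq_false_iff_ne.mpr h
      simp [hak]

-- the length drop of the head-class removal is the head's multiplicity
theorem count_head_eq_drop (k : List String) (t : List (List String)) :
    (k :: t).count k = (t.length + 1) - (t.filter (fun x => x ≠ k)).length := by
  have hsplit : t.length = (t.filter (fun x => x == k)).length + (t.filter (fun x => x ≠ k)).length := by
    induction t with
    | nil => rfl
    | cons a s ih =>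
      by_cases h : a = k
      · rw [List.filter_cons_of_pos (by simp [h]), List.filter_cons_of_neg (by simp [h])]
        simp [ih]; omega
      · rw [List.filter_cons_of_neg (by simp [h]), List.filter_cons_of_pos (by simpa using h)]
        simp [ih]; omega
  have hcount : t.count k = (t.filter (fun x => x == k)).length := by
    simp [List.count_eq_countP, List.countP_eq_length_filter]
  rw [List.count_cons_self]
  omega

-- the key invariant: A's per-occurrence count of multiplicity-2 elements is twice
-- B's per-class count of size-2 classes
theorem two_mul_pvPairs (l : List (List String)) :
    2 * pvPairs l = (l.countP (fun x => l.count x == 2) : Int) := by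
  induction l using pvPairs.induct with
  | case1 => simp [pvPairs]
  | case2 k t ih =>
    have hfe : (List.filter (fun x : {x // x ∈ t} => decide (↑x ≠ k)) t.attach).unattach
        = t.filter (fun x => decide (x ≠ k)) := by
      rw [List.unattach_filter (g := fun x => decide (x ≠ k)) (hf := fun x h => rfl),
        List.unattach_attach]
    rw [hfe] at ih
    rw [pvPairs]
    have hm := count_head_eq_drop k t
    have hrfilter : (k :: t).filter (fun x => x ≠ k) = t.filter (fun x => x ≠ k) :=
      List.filter_cons_of_neg (by simp)
    have hrestcount : (t.filter (fun x => x ≠ k)).countP (fun x => (t.filter (fun y => y ≠ k)).count x == 2)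
        = (t.filter (fun x => x ≠ k)).countP (fun x => (k :: t).count x == 2) := by
      apply List.countP_congr
      intro x hx
      have hxk : x ≠ k := by simpa using (List.of_mem_filter hx)
      rw [count_filter_ne k x t hxk]
      simp [List.count_cons, beq_eq_false_iff_ne.mpr (Ne.symm hxk)]
    have hsplit := countP_partition k (k :: t) (fun x => (k :: t).count x == 2)
    have hfeq := countP_filter_eq k (k :: t) (fun x => (k :: t).count x == 2)
    rw [hrfilter] at hsplit
    rw [hsplit, hfeq, ← hrestcount, ← hm]
    push_cast
    split_ifs with h
    · simp only [beq_iff_eq] at h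
      rw [h] at *
      omega
    · simp only [beq_iff_eq] at h
      omega

theorem yibeikou_spec : Claim_equal_yibeikou := by
  intro hand _ hpre
  unfold Spec_yibeikou yibeikou yibeikou_alt pai2onlyno
  dsimp only
  rw [PySem.List.foldl_append_singleton_eq_map, List.nil_append]
  rw [List.map_congr_left (fun h hh => newh_eq_key h (hpre h hh).1)]
  rw [PySem.List.foldl_if_add_one (fun h => (hand.map pvKey).count h == 2)]
  have hkey := two_mul_pvPairs (hand.map pvKey)
  set l := hand.map pvKey
  rcases eq_or_ne (pvPairs l) 1 with h1 | h1
  · have : (l.countP (fun x => l.count x == 2) : Int) = 2 := by omega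
    simp [h1, this]
  · have hA : ((l.countP (fun x => l.count x == 2)) : Int) ≠ 2 := by omega
    have e1 : ((0 + (l.countP (fun x => l.count x == 2) : Int)) == 2) = false := by
      simpa using hA
    have e2 : (pvPairs l == 1) = false := by simpa using h1
    rw [e1, e2]
    simp
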